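-- pv_equiv track=rewrite | github.com/Toosh1/AICW2G34 | src/chatbot/routes.py | find_all_paths_with_routes
-- ===== SOURCE A (Python) =====
-- def find_all_paths_with_routes(graph, route_map, start, end, max_depth=10):
--     """
--     Uses DFS to find all paths between two stations, up to a depth.
--     """
--     start = start.strip().upper()
--     end = end.strip().upper()
--     all_paths = []
--
--     def dfs(path, routes, visited):
--         current = path[-1]
--         if len(path) > max_depth:
--             return
--         if current == end:
--             all_paths.append(list(zip(path, [""] + routes)))
--             return
--         for neighbor in graph[current]:
--             if neighbor not in visited:
--                 visited.add(neighbor)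
--                 route_used = route_map[(current, neighbor)][0]
--                 dfs(path + [neighbor], routes + [route_used], visited)
--                 visited.remove(neighbor)
--
--     dfs([start], [], set([start]))
--     return all_paths
-- ===== SOURCE B (Python) =====
-- def find_all_paths_with_routes(graph, route_map, start, end, max_depth=10):
--     """Iterative DFS with an explicit stack of (path, routes, visited) states."""
--     start = start.strip().upper()
--     end = end.strip().upper()
--     all_paths = []
--     stack = [([start], [], {start})]
--     while stack:
--         path, routes, visited = stack.pop()
--         if len(path) > max_depth:
--             continue
--         current = path[-1]
--         if current == end:
--             all_paths.append(list(zip(path, [""] + routes)))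
--             continue
--         for neighbor in reversed(graph[current]):
--             if neighbor not in visited:
--                 stack.append((path + [neighbor],
--                               routes + [route_map[(current, neighbor)][0]],
--                               visited | {neighbor}))
--     return all_paths
-- ===== Notes on version B (the rewrite author's own statement) =====
-- stated objective: alternative
-- what changed: Replaces the recursive closure-based DFS with a shared mutable visited set by an iterative loop over an explicit stack of (path, routes, visited) states, pushing neighbors in reversed order so the LIFO pop reproduces A's output order exactly.
import Mathlib
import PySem

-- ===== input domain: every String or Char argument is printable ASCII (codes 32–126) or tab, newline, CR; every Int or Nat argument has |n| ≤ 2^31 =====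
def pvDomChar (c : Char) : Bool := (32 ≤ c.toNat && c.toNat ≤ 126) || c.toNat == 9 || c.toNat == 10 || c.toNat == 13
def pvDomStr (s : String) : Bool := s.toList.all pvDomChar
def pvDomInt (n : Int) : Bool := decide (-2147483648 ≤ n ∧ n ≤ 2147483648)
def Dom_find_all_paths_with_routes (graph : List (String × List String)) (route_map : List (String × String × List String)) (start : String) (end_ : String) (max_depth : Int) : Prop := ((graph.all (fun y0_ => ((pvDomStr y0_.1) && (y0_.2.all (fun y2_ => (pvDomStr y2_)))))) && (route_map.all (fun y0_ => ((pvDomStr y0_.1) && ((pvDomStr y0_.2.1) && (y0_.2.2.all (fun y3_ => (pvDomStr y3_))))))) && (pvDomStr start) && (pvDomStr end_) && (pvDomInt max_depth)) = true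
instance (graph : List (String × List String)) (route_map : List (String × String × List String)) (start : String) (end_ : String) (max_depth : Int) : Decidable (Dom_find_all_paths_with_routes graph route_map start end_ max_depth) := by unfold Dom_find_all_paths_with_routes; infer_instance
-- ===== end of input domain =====

-- B replaces A's recursive DFS (shared mutable visited set, backtracked add/remove) by an
-- iterative loop over an explicit stack of (path, routes, visited-copy) states; return values
-- are proved equal on Pre_ (exactly the inputs where A returns rather than raises).
-- Both ports are made total with a fuel parameter large enough that the 0-branch is unreachable
-- (for A one unit per depth level; for B an upper bound on the number of loop iterations).

-- ===== PORT A =====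
-- graph[current]: dict lookup, first match; total form ([] where Python raises KeyError, excluded by Pre_)
def pvGraphGet (graph : List (String × List String)) (k : String) : List String :=
  match graph with
  | [] => []
  | (a, vs) :: rest => if a = k then vs else pvGraphGet rest k

-- route_map[(c, n)][0]: tuple-keyed dict lookup then [0]; total form ("" where Python raises, excluded by Pre_)
def pvRouteGet (route_map : List (String × String × List String)) (c n : String) : String :=
  match route_map with
  | [] => ""
  | (a, b, vs) :: rest => if a = c ∧ b = n then vs.headD "" else pvRouteGet rest c n

-- the inner recursive closure `dfs`, accumulating into all_paths (acc); the for-loop is the foldl;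
-- fuel = one unit per depth level (invariant: fuel = (max_depth + 2 - path.length).toNat, so the
-- 0-branch fires only where the `len(path) > max_depth` guard would return acc anyway)
def pvDfsA (graph : List (String × List String)) (route_map : List (String × String × List String)) (end_ : String) (max_depth : Int) (fuel : Nat) (path routes : List String) (visited : PySem.Set String) (acc : List (List (String × String))) : List (List (String × String)) :=
  match fuel with
  | 0 => acc
  | fuel + 1 =>
    let current := path.getLastD ""
    if (path.length : Int) > max_depth then acc
    else if current = end_ then acc ++ [path.zip ("" :: routes)]
    else
      (pvGraphGet graph current).foldl
        (fun a neighbor =>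
          if ¬ PySem.Set.contains visited neighbor then
            pvDfsA graph route_map end_ max_depth fuel (path ++ [neighbor])
              (routes ++ [pvRouteGet route_map current neighbor])
              (PySem.Set.add visited neighbor) a
          else a) acc

def find_all_paths_with_routes (graph : List (String × List String)) (route_map : List (String × String × List String)) (start : String) (end_ : String) (max_depth : Int) : List (List (String × String)) :=
  let start := PySem.Str.upper (PySem.Str.strip start)
  let end_ := PySem.Str.upper (PySem.Str.strip end_)
  pvDfsA graph route_map end_ max_depth ((max_depth + 1).toNat) [start] [] (PySem.Set.ofList [start]) []

-- ===== PORT B =====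
-- one stack state: (path, routes, visited)
abbrev PvState := List String × List String × PySem.Set String

-- the distinct nodes any path from S can visit (S plus every neighbour mentioned in graph)
def pvUniv (graph : List (String × List String)) (S : String) : List String :=
  PySem.List.dedup (S :: graph.flatMap (fun p => p.2))

def pvMaxDeg (graph : List (String × List String)) : Nat :=
  graph.foldr (fun p m => max p.2.length m) 0

-- fuel for the while loop: strictly more than the stack measure proved below ever is
def pvFuelB (graph : List (String × List String)) (S : String) (max_depth : Int) : Nat :=
  (pvMaxDeg graph + 1) ^ ((min (max_depth + 1) (((pvUniv graph S).length : Int) + 1)).toNat) + 1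

-- the `while stack:` loop; stack top at the HEAD of the list (push = cons, pop = head)
def pvLoopB (graph : List (String × List String)) (route_map : List (String × String × List String)) (end_ : String) (max_depth : Int) (fuel : Nat) (stack : List PvState) (acc : List (List (String × String))) : List (List (String × String)) :=
  match fuel with
  | 0 => acc
  | fuel + 1 =>
    match stack with
    | [] => acc
    | (path, routes, visited) :: rest =>
      if (path.length : Int) > max_depth then pvLoopB graph route_map end_ max_depth fuel rest acc
      else if path.getLastD "" = end_ then
        pvLoopB graph route_map end_ max_depth fuel rest (acc ++ [path.zip ("" :: routes)])
      else
        -- `for neighbor in reversed(graph[current]): if neighbor not in visited: stack.append(...)`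
        pvLoopB graph route_map end_ max_depth fuel
          ((pvGraphGet graph (path.getLastD "")).reverse.foldl
            (fun st n => if ¬ PySem.Set.contains visited n then
                (path ++ [n], routes ++ [pvRouteGet route_map (path.getLastD "") n], PySem.Set.union visited [n]) :: st
              else st) rest)
          acc

def find_all_paths_with_routes_alt (graph : List (String × List String)) (route_map : List (String × String × List String)) (start : String) (end_ : String) (max_depth : Int) : List (List (String × String)) :=
  let start := PySem.Str.upper (PySem.Str.strip start)
  let end_ := PySem.Str.upper (PySem.Str.strip end_)
  pvLoopB graph route_map end_ max_depth (pvFuelB graph start max_depth) [([start], [], PySem.Set.ofList [start])] []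

-- ===== PRECONDITION & SPEC =====
-- Pre_ excludes EXACTLY the inputs on which Python A raises (KeyError on graph/route_map, IndexError
-- on an empty route list) and admits every input A returns on.  A raises iff the DFS reaches, via
-- some duplicate-free path from START of length ≤ max_depth that stops at END, a node whose dict
-- lookups fail; simple-path reachability has no quantifier-free closed form, so Pre_ quantifies over
-- the explicitly enumerated duplicate-free paths (pvCallPaths) and requires each reached node to be a
-- graph key whose outgoing edges to unvisited neighbours have a route_map entry with a non-empty list.

-- all duplicate-free paths from S whose every proper prefix has length < md and does not end at E
def pvCallPaths (graph : List (String × List String)) (S E : String) (md : Int) : List (List String) :=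
  ((List.range (pvUniv graph S).length).foldl
    (fun st _ =>
      let nxt := st.2.flatMap (fun p =>
        if (p.length : Int) < md ∧ p.getLastD "" ≠ E then
          (((graph.find? (fun q => q.1 == p.getLastD "")).map (fun q => q.2)).getD []).filterMap
            (fun w => if w ∉ p then some (p ++ [w]) else none)
        else [])
      (st.1 ++ nxt, nxt))
    ([[S]], [[S]])).1

def Pre_find_all_paths_with_routes (graph : List (String × List String)) (route_map : List (String × String × List String)) (start : String) (end_ : String) (max_depth : Int) : Prop :=
  ∀ p ∈ pvCallPaths graph (PySem.Str.upper (PySem.Str.strip start)) (PySem.Str.upper (PySem.Str.strip end_)) max_depth,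
    (p.length : Int) ≤ max_depth →
    (p.getLastD "" = PySem.Str.upper (PySem.Str.strip end_) ∨
      ((∃ q ∈ graph, q.1 = p.getLastD "") ∧
       ∀ w ∈ ((graph.find? (fun q => q.1 == p.getLastD "")).map (fun q => q.2)).getD [], w ∉ p →
         ((route_map.find? (fun e => e.1 == p.getLastD "" && e.2.1 == w)).map (fun e => e.2.2)).getD [] ≠ []))
instance (graph : List (String × List String)) (route_map : List (String × String × List String)) (start : String) (end_ : String) (max_depth : Int) : Decidable (Pre_find_all_paths_with_routes graph route_map start end_ max_depth) := by unfold Pre_find_all_paths_with_routes; infer_instance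

def pvWitness_find_all_paths_with_routes : (List (String × List String)) × (List (String × String × List String)) × String × String × Int :=
  ([("A", ["B"]), ("B", ["A"])], [("A", "B", ["R1"]), ("B", "A", ["R2"])], "a ", "B", 10)

def Spec_find_all_paths_with_routes (graph : List (String × List String)) (route_map : List (String × String × List String)) (start : String) (end_ : String) (max_depth : Int) (out : List (List (String × String))) : Prop := out = find_all_paths_with_routes_alt graph route_map start end_ max_depth
instance (graph : List (String × List String)) (route_map : List (String × String × List String)) (start : String) (end_ : String) (max_depth : Int) (out : List (List (String × String))) : Decidable (Spec_find_all_paths_with_routes graph route_map start end_ max_depth out) := by unfold Spec_find_all_paths_with_routes; infer_instance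

-- ===== CLAIM (what is proved, stated in full; the proofs are below) =====
def Claim_equal_find_all_paths_with_routes : Prop := ∀ (graph : List (String × List String)) (route_map : List (String × String × List String)) (start : String) (end_ : String) (max_depth : Int), Dom_find_all_paths_with_routes graph route_map start end_ max_depth → Pre_find_all_paths_with_routes graph route_map start end_ max_depth → Spec_find_all_paths_with_routes graph route_map start end_ max_depth (find_all_paths_with_routes graph route_map start end_ max_depth)

-- ===== LEMMAS AND PROOFS =====

-- weight of one stack state: (D+1)^(m - path length), m the depth bound min(max_depth+1, |univ|+1)
def pvWeight (m : Int) (D : Nat) (s : PvState) : Nat :=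
  (D + 1) ^ ((m - s.1.length).toNat)

def pvBound (graph : List (String × List String)) (S : String) (max_depth : Int) : Int :=
  min (max_depth + 1) (((pvUniv graph S).length : Int) + 1)

def pvMeas (graph : List (String × List String)) (S : String) (max_depth : Int) (stack : List PvState) : Nat :=
  (stack.map (pvWeight (pvBound graph S max_depth) (pvMaxDeg graph))).sum

-- state invariant: the path is duplicate-free, lives in pvUniv, and is contained in visited
def pvInv (graph : List (String × List String)) (S : String) (s : PvState) : Prop :=
  s.1.Nodup ∧ (∀ x ∈ s.1, x ∈ pvUniv graph S) ∧ (∀ x ∈ s.1, x ∈ s.2.2)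

theorem pvGraphGet_length_le (g : List (String × List String)) (k : String) :
    (pvGraphGet g k).length ≤ pvMaxDeg g := by
  induction g with
  | nil => simp [pvGraphGet, pvMaxDeg]
  | cons p t ih =>
    obtain ⟨a, vs⟩ := p
    simp only [pvGraphGet, pvMaxDeg, List.foldr_cons]
    split
    · exact le_max_left _ _
    · exact le_trans ih (le_max_right _ _)

theorem pvGraphGet_subset_univ (g : List (String × List String)) (S k : String) :
    ∀ w ∈ pvGraphGet g k, w ∈ pvUniv g S := by
  intro w hw
  rw [pvUniv, PySem.List.mem_dedup]
  refine List.mem_cons_of_mem _ (List.mem_flatMap.2 ?_)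
  induction g with
  | nil => simp [pvGraphGet] at hw
  | cons p t ih =>
    obtain ⟨a, vs⟩ := p
    simp only [pvGraphGet] at hw
    split at hw
    · exact ⟨(a, vs), List.mem_cons_self, hw⟩
    · obtain ⟨q, hq, hwq⟩ := ih hw
      exact ⟨q, List.mem_cons_of_mem _ hq, hwq⟩

theorem pvMeas_lt_pop (g : List (String × List String)) (S : String) (md : Int) (s : PvState) (rest : List PvState) :
    pvMeas g S md rest < pvMeas g S md (s :: rest) := by
  simp only [pvMeas, List.map_cons, List.sum_cons]
  have : 0 < pvWeight (pvBound g S md) (pvMaxDeg g) s := Nat.pow_pos (Nat.succ_pos _)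
  omega

theorem pvFold_sum_le (m : Int) (D : Nat) (p : String → Prop) [DecidablePred p]
    (f : String → PvState) (W : Nat) (hf : ∀ n, pvWeight m D (f n) ≤ W) :
    ∀ (ns : List String) (rest : List PvState),
      (((ns.foldl (fun st n => if p n then f n :: st else st) rest).map (pvWeight m D)).sum)
        ≤ ns.length * W + ((rest.map (pvWeight m D)).sum) := by
  intro ns
  induction ns with
  | nil => intro rest; simp
  | cons n t ih =>
    intro rest
    simp only [List.foldl_cons, List.length_cons]
    refine le_trans (ih _) ?_
    split
    · simp only [List.map_cons, List.sum_cons]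
      have := hf n
      nlinarith
    · nlinarith

theorem pvMeas_lt_push (g : List (String × List String)) (rm : List (String × String × List String))
    (S : String) (md : Int) (path routes : List String) (visited : PySem.Set String) (rest : List PvState)
    (h : ¬ (path.length : Int) > md) (hU : path.length ≤ (pvUniv g S).length) :
    pvMeas g S md
      ((pvGraphGet g (path.getLastD "")).reverse.foldl
        (fun st n => if ¬ PySem.Set.contains visited n then
            (path ++ [n], routes ++ [pvRouteGet rm (path.getLastD "") n], PySem.Set.union visited [n]) :: st
          else st) rest)
      < pvMeas g S md ((path, routes, visited) :: rest) := by
  have hk : (pvBound g S md - (path.length : Int)).toNat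
      = (pvBound g S md - (path.length : Int) - 1).toNat + 1 := by
    simp only [pvBound]
    omega
  have hWpos : 0 < (pvMaxDeg g + 1) ^ ((pvBound g S md - (path.length : Int) - 1).toNat) := Nat.pow_pos (Nat.succ_pos _)
  have hf : ∀ n : String,
      pvWeight (pvBound g S md) (pvMaxDeg g)
        ((path ++ [n], routes ++ [pvRouteGet rm (path.getLastD "") n], PySem.Set.union visited [n]) : PvState)
        ≤ (pvMaxDeg g + 1) ^ ((pvBound g S md - (path.length : Int) - 1).toNat) := by
    intro n
    apply le_of_eq
    simp only [pvWeight]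
    congr 1
    simp only [List.length_append, List.length_cons, List.length_nil]
    omega
  have hb := pvFold_sum_le (pvBound g S md) (pvMaxDeg g) (fun n => ¬ PySem.Set.contains visited n = true)
      (fun n => ((path ++ [n], routes ++ [pvRouteGet rm (path.getLastD "") n], PySem.Set.union visited [n]) : PvState))
      ((pvMaxDeg g + 1) ^ ((pvBound g S md - (path.length : Int) - 1).toNat)) hf
      ((pvGraphGet g (path.getLastD "")).reverse) rest
  have hlen : (pvGraphGet g (path.getLastD "")).reverse.length ≤ pvMaxDeg g := by
    simpa using pvGraphGet_length_le g (path.getLastD "")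
  have hmul : (pvGraphGet g (path.getLastD "")).reverse.length * ((pvMaxDeg g + 1) ^ ((pvBound g S md - (path.length : Int) - 1).toNat))
      ≤ pvMaxDeg g * ((pvMaxDeg g + 1) ^ ((pvBound g S md - (path.length : Int) - 1).toNat)) :=
    Nat.mul_le_mul_right _ hlen
  have hws : pvWeight (pvBound g S md) (pvMaxDeg g) ((path, routes, visited) : PvState)
      = (pvMaxDeg g + 1) * ((pvMaxDeg g + 1) ^ ((pvBound g S md - (path.length : Int) - 1).toNat)) := by
    simp only [pvWeight, hk, pow_succ]
    ring
  simp only [pvMeas, List.map_cons, List.sum_cons] at *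
  rw [hws]
  have hexp : (pvMaxDeg g + 1) * ((pvMaxDeg g + 1) ^ ((pvBound g S md - (path.length : Int) - 1).toNat))
      = pvMaxDeg g * ((pvMaxDeg g + 1) ^ ((pvBound g S md - (path.length : Int) - 1).toNat))
        + (pvMaxDeg g + 1) ^ ((pvBound g S md - (path.length : Int) - 1).toNat) := by ring
  omega

-- pushing with an if-cons foldl = prepending the reversed filterMap (stated in pvLoopB's exact shape)
theorem pvPush_eq (rm : List (String × String × List String)) (path routes : List String)
    (visited : PySem.Set String) :
    ∀ (l : List String) (rest : List PvState),
      l.foldl (fun st n => if ¬ PySem.Set.contains visited n then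
          (path ++ [n], routes ++ [pvRouteGet rm (path.getLastD "") n], PySem.Set.union visited [n]) :: st
        else st) rest
      = (l.filterMap (fun n => if ¬ PySem.Set.contains visited n then
          some ((path ++ [n], routes ++ [pvRouteGet rm (path.getLastD "") n], PySem.Set.union visited [n]) : PvState)
        else none)).reverse ++ rest := by
  intro l
  induction l with
  | nil => intro rest; simp
  | cons n t ih =>
    intro rest
    simp only [List.foldl_cons, List.filterMap_cons]
    split
    · rw [ih]
      simp
    · rw [ih]

theorem pvFoldl_filterMap {α β γ : Type} (g : α → Option β) (F : γ → β → γ) :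
    ∀ (l : List α) (a : γ),
      (l.filterMap g).foldl F a = l.foldl (fun a n => match g n with | some s => F a s | none => a) a := by
  intro l
  induction l with
  | nil => intro a; simp
  | cons n t ih =>
    intro a
    simp only [List.filterMap_cons]
    cases hg : g n with
    | none => simpa [hg] using ih a
    | some s => simp [hg, ih]

-- pvDfsA returns acc under the depth guard, for every fuel
theorem pvDfsA_guard (g : List (String × List String)) (rm : List (String × String × List String))
    (e : String) (md : Int) (f : Nat) (path routes : List String) (visited : PySem.Set String)
    (acc : List (List (String × String))) (h : (path.length : Int) > md) :
    pvDfsA g rm e md f path routes visited acc = acc := by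
  cases f <;> simp [pvDfsA, h]

-- invariant is preserved by pushing the unvisited neighbours
theorem pvInv_push (g : List (String × List String)) (rm : List (String × String × List String))
    (S : String) (path routes : List String) (visited : PySem.Set String) (rest : List PvState)
    (hinv : pvInv g S (path, routes, visited))
    (hrest : ∀ s ∈ rest, pvInv g S s) :
    ∀ s ∈ (pvGraphGet g (path.getLastD "")).reverse.foldl
        (fun st n => if ¬ PySem.Set.contains visited n then
            (path ++ [n], routes ++ [pvRouteGet rm (path.getLastD "") n], PySem.Set.union visited [n]) :: st
          else st) rest, pvInv g S s := by
  intro s hs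
  rw [pvPush_eq] at hs
  rcases List.mem_append.1 hs with hs | hs
  · obtain ⟨n, hn, hsome⟩ := List.mem_filterMap.1 (List.mem_reverse.1 hs)
    rw [List.mem_reverse] at hn
    split at hsome
    case isFalse => exact absurd hsome (by simp)
    case isTrue hnv =>
      have hnmem : n ∉ visited := by
        intro hmem
        exact hnv ((PySem.Set.contains_iff _ _).2 hmem)
      obtain ⟨hnd, huniv, hvis⟩ := hinv
      obtain rfl := Option.some.inj hsome
      refine ⟨?_, ?_, ?_⟩
      · refine List.Nodup.append hnd (List.nodup_singleton n) ?_
        intro x hx hx1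
        rw [List.mem_singleton] at hx1
        subst hx1
        exact hnmem (hvis x hx)
      · intro x hx
        rcases List.mem_append.1 hx with hx | hx
        · exact huniv x hx
        · rw [List.mem_singleton] at hx
          subst hx
          exact pvGraphGet_subset_univ g S _ x hn
      · intro x hx
        rw [PySem.Set.mem_union]
        rcases List.mem_append.1 hx with hx | hx
        · exact Or.inl (hvis x hx)
        · exact Or.inr hx
  · exact hrest s hs

-- nodup path inside univ: length bounded by |univ|
theorem pvLen_le_univ (g : List (String × List String)) (S : String) (p : List String)
    (hnd : p.Nodup) (hsub : ∀ x ∈ p, x ∈ pvUniv g S) : p.length ≤ (pvUniv g S).length :=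
  (List.subperm_of_subset hnd hsub).length_le

-- the while loop computes, state by state, exactly what A's dfs computes on each state
theorem pvLoopB_eq (graph : List (String × List String)) (route_map : List (String × String × List String))
    (S end_ : String) (max_depth : Int) :
    ∀ (fuel : Nat) (stack : List PvState) (acc : List (List (String × String))),
      pvMeas graph S max_depth stack < fuel →
      (∀ s ∈ stack, pvInv graph S s) →
      pvLoopB graph route_map end_ max_depth fuel stack acc
        = stack.foldl (fun a s =>
            pvDfsA graph route_map end_ max_depth ((max_depth + 2 - s.1.length).toNat) s.1 s.2.1 s.2.2 a) acc := by
  intro fuel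
  induction fuel with
  | zero => intro stack acc hm _; omega
  | succ fuel ih =>
    intro stack acc hm hinv
    match stack with
    | [] => simp [pvLoopB]
    | (path, routes, visited) :: rest =>
      have hmrest : pvMeas graph S max_depth rest < fuel :=
        lt_of_lt_of_le (pvMeas_lt_pop graph S max_depth _ rest) (Nat.lt_succ_iff.1 hm)
      have hinvrest : ∀ s ∈ rest, pvInv graph S s := fun s hs => hinv s (List.mem_cons_of_mem _ hs)
      by_cases h : (path.length : Int) > max_depth
      · rw [pvLoopB, if_pos h, ih rest acc hmrest hinvrest, List.foldl_cons,
          pvDfsA_guard _ _ _ _ _ _ _ _ _ h]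
      · have hfa : (max_depth + 2 - (path.length : Int)).toNat
            = (max_depth + 1 - (path.length : Int)).toNat + 1 := by omega
        by_cases he : path.getLastD "" = end_
        · rw [pvLoopB, if_neg h, if_pos he, ih rest _ hmrest hinvrest, List.foldl_cons, hfa, pvDfsA]
          simp only [if_neg h, if_pos he]
        · have hU : path.length ≤ (pvUniv graph S).length := by
            obtain ⟨hnd, huniv, _⟩ := hinv _ List.mem_cons_self
            exact pvLen_le_univ graph S path hnd huniv
          have hmpush : pvMeas graph S max_depth
              ((pvGraphGet graph (path.getLastD "")).reverse.foldl
                (fun st n => if ¬ PySem.Set.contains visited n then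
                    (path ++ [n], routes ++ [pvRouteGet route_map (path.getLastD "") n], PySem.Set.union visited [n]) :: st
                  else st) rest) < fuel :=
            lt_of_lt_of_le (pvMeas_lt_push graph route_map S max_depth path routes visited rest h hU)
              (Nat.lt_succ_iff.1 hm)
          have hinvpush := pvInv_push graph route_map S path routes visited rest
            (hinv _ List.mem_cons_self) hinvrest
          rw [pvLoopB, if_neg h, if_neg he, ih _ acc hmpush hinvpush]
          rw [pvPush_eq, List.foldl_append, List.foldl_cons]
          congr 1
          rw [List.filterMap_reverse, List.reverse_reverse, pvFoldl_filterMap, hfa, pvDfsA]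
          simp only [if_neg h, if_neg he]
          refine List.foldl_ext _ _ acc fun a n _ => ?_
          have hlen2 : (max_depth + 2 - ((path ++ [n]).length : Int)).toNat
              = (max_depth + 1 - (path.length : Int)).toNat := by
            simp only [List.length_append, List.length_cons, List.length_nil]
            omega
          by_cases hc : n ∈ visited
          · simp [hc]
          · simp only [hc, not_false_eq_true, if_pos, PySem.Set.contains,
              List.contains_eq_mem, decide_eq_true_eq, hlen2]
            simp [hc, PySem.Set.union, PySem.Set.update, PySem.Set.add]

-- ===== VERDICT (by name: the statement is the Claim_ definition above) =====
theorem find_all_paths_with_routes_spec : Claim_equal_find_all_paths_with_routes := by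
  intro graph route_map start end_ max_depth _ _
  unfold Spec_find_all_paths_with_routes
  unfold find_all_paths_with_routes find_all_paths_with_routes_alt
  set S := PySem.Str.upper (PySem.Str.strip start) with hS
  rw [pvLoopB_eq graph route_map S (PySem.Str.upper (PySem.Str.strip end_)) max_depth
      (pvFuelB graph S max_depth) _ []
      (by
        simp only [pvMeas, pvFuelB, List.map_cons, List.map_nil, List.sum_cons, List.sum_nil,
          pvWeight, pvBound, List.length_cons, List.length_nil]
        have hpow : (pvMaxDeg graph + 1) ^ ((min (max_depth + 1) (((pvUniv graph S).length : Int) + 1)) - ((0 + 1 : Nat) : Int)).toNat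
            ≤ (pvMaxDeg graph + 1) ^ (min (max_depth + 1) (((pvUniv graph S).length : Int) + 1)).toNat :=
          Nat.pow_le_pow_right (by omega) (by omega)
        omega)
      (by
        intro s hs
        rw [List.mem_singleton] at hs
        subst hs
        refine ⟨List.nodup_singleton S, ?_, ?_⟩
        · intro x hx
          rw [List.mem_singleton] at hx
          subst hx
          rw [pvUniv, PySem.List.mem_dedup]
          exact List.mem_cons_self
        · intro x hx
          rw [List.mem_singleton] at hx
          subst hx
          simp [PySem.Set.mem_ofList])]
  simp only [List.foldl_cons, List.foldl_nil, List.length_cons, List.length_nil]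
  congr 1
  omega
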